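-- pv_equiv track=rewrite | github.com/beerbank3/Programmers-Python | 프로그래머스/unrated/181864. 문자열 바꿔서 찾기/문자열 바꿔서 찾기.py | solution
-- ===== SOURCE A (Python) =====
-- def solution(myString, pat):
--     answer = ''
--     for i in myString:
--         if 'A' == i:
--             answer += 'B'
--         elif 'B' == i:
--             answer += 'A'
--     if pat in answer:
--         return 1
--     return 0
-- ===== SOURCE B (Python) =====
-- def solution(myString, pat):
--     # Search the un-swapped A/B subsequence for the swapped pattern (A<->B is an involution).
--     filtered = ''.join(c for c in myString if c == 'A' or c == 'B')
--     swapped_pat = ''.join('B' if c == 'A' else 'A' if c == 'B' else c for c in pat)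
--     return 1 if swapped_pat in filtered else 0
-- ===== Notes on version B (the rewrite author's own statement) =====
-- stated objective: alternative
-- what changed: Instead of building the swapped A/B string and searching it for pat, B filters myString to its A/B characters unchanged and searches it for the swapped pattern, using that the A<->B swap is an involution.
import Mathlib
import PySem

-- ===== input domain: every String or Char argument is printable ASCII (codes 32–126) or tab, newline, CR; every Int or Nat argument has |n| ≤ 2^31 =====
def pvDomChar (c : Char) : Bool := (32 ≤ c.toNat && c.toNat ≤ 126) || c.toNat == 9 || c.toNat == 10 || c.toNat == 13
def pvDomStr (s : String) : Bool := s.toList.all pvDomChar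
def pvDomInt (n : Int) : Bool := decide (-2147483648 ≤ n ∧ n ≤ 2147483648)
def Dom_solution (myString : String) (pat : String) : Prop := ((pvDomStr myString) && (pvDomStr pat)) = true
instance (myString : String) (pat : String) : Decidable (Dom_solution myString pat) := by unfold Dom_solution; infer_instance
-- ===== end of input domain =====

-- B searches the unchanged A/B-filtered string for the A<->B-swapped pattern (involution trick) instead of building the swapped string and searching it for pat.


-- ===== PORT A =====
def solution (myString : String) (pat : String) : Int :=
  let answer : List Char :=
    myString.toList.foldl (fun acc i =>
      if 'A' == i then acc ++ ['B']
      else if 'B' == i then acc ++ ['A']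
      else acc) []
  if PySem.Chars.isIn pat.toList answer then 1 else 0

-- ===== PORT B =====
def pvSwapAB (c : Char) : Char := if c == 'A' then 'B' else if c == 'B' then 'A' else c

def solution_alt (myString : String) (pat : String) : Int :=
  let filtered : List Char := myString.toList.filter (fun c => c == 'A' || c == 'B')
  let swappedPat : List Char := pat.toList.map pvSwapAB
  if PySem.Chars.isIn swappedPat filtered then 1 else 0

-- ===== PRECONDITION & SPEC =====
def Spec_solution (myString : String) (pat : String) (out : Int) : Prop := out = solution_alt myString pat
instance (myString : String) (pat : String) (out : Int) : Decidable (Spec_solution myString pat out) := by unfold Spec_solution; infer_instance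

-- ===== CLAIM (what is proved, stated in full; the proofs are below) =====
def Claim_equal_solution : Prop := ∀ (myString : String) (pat : String), Dom_solution myString pat → Spec_solution myString pat (solution myString pat)

-- ===== LEMMAS AND PROOFS =====

theorem pvSwapAB_invol (c : Char) : pvSwapAB (pvSwapAB c) = c := by
  unfold pvSwapAB
  by_cases h : c = 'A' <;> by_cases h' : c = 'B' <;> simp [h, h']

theorem pvMap_swap_invol (l : List Char) : (l.map pvSwapAB).map pvSwapAB = l := by
  simp [List.map_map, Function.comp_def, pvSwapAB_invol]

theorem pvInfix_map {α β : Type} (f : α → β) {xs ys : List α} (h : xs <:+: ys) :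
    xs.map f <:+: ys.map f := by
  obtain ⟨s, t, rfl⟩ := h
  exact ⟨s.map f, t.map f, by simp⟩

theorem pvAnswer_eq (l : List Char) (acc : List Char) :
    l.foldl (fun acc i =>
      if 'A' == i then acc ++ ['B']
      else if 'B' == i then acc ++ ['A']
      else acc) acc = acc ++ (l.filter (fun c => c == 'A' || c == 'B')).map pvSwapAB := by
  induction l generalizing acc with
  | nil => simp
  | cons c rest ih =>
    rw [List.foldl_cons, ih]
    by_cases h : c = 'A'
    · subst h; simp [pvSwapAB]
    · by_cases h' : c = 'B'
      · subst h'; simp [pvSwapAB]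
      · rw [if_neg (fun hh => h (eq_of_beq hh).symm), if_neg (fun hh => h' (eq_of_beq hh).symm)]
        simp [h, h']

theorem pvInfix_iff (pat l : List Char) :
    pat <:+: l.map pvSwapAB ↔ pat.map pvSwapAB <:+: l := by
  constructor
  · intro h
    have := pvInfix_map pvSwapAB h
    rwa [pvMap_swap_invol] at this
  · intro h
    have := pvInfix_map pvSwapAB h
    rwa [pvMap_swap_invol] at this

theorem pvIsIn_eq (pat l : List Char) :
    PySem.Chars.isIn pat (l.map pvSwapAB) = PySem.Chars.isIn (pat.map pvSwapAB) l := by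
  by_cases h : pat.map pvSwapAB <:+: l
  · rw [(PySem.Chars.isIn_iff_infix _ _).2 ((pvInfix_iff _ _).2 h),
       (PySem.Chars.isIn_iff_infix _ _).2 h]
  · rw [(PySem.Chars.isIn_eq_false_iff _ _).2 (fun hc => h ((pvInfix_iff _ _).1 hc)),
       (PySem.Chars.isIn_eq_false_iff _ _).2 h]

-- ===== VERDICT (by name: the statement is the Claim_ definition above) =====
theorem solution_spec : Claim_equal_solution := by
  intro myString pat _
  unfold Spec_solution solution solution_alt
  rw [pvAnswer_eq, List.nil_append]
  simp only [pvIsIn_eq]
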